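-- pv_equiv track=rewrite | github.com/ArmanK5/ChessGameAI | ChessAI.py | board_score
-- ===== SOURCE A (Python) =====
-- def board_score(board):
--     score = 0
--     for r in board:  # for each row
--         for s in r:  # for each square to get material
--             if s[0] == 'w':  # + and - because of zero-sum game
--                 multiplier = 1
--             elif s[0] == 'b':
--                 multiplier = -1
--             else:  # if empty square then next if
--                 continue
--             if s[1] == 'p':
--                 score += multiplier*1
--             elif s[1] == 'N' or s[1] == 'B':
--                 score += multiplier*3
--             elif s[1] == 'r':
--                 score += multiplier*5
--             elif s[1] == 'Q':
--                 score += multiplier*10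
--             elif s[1] == 'K':
--                 score += 0
--
--     return score
-- ===== SOURCE B (Python) =====
-- def board_score(board):
--     counts = {}
--     for r in board:
--         for s in r:
--             counts[s] = counts.get(s, 0) + 1
--     signs = {'w': 1, 'b': -1}
--     values = {'p': 1, 'N': 3, 'B': 3, 'r': 5, 'Q': 10, 'K': 0}
--     return sum(signs.get(p[:1], 0) * values.get(p[1:2], 0) * n
--                for p, n in counts.items())
-- ===== Notes on version B (the rewrite author's own statement) =====
-- stated objective: alternative
-- what changed: B replaces A's per-square branch cascade with a count-then-weight strategy: one pass builds a dict counting each distinct square string, then the score is the sum of sign*value*count over the distinct entries, with sign/value taken from two small lookup tables via slices with a default of 0.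
-- crash fix: On boards containing an empty square string or a one-character square string starting with 'w' or 'b', A raises IndexError (s[0] or s[1]); B returns the material sum with such squares contributing 0. — e.g. on board_score([["wp", "w", ""]]): A raises IndexError, B returns 1
import Mathlib
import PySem

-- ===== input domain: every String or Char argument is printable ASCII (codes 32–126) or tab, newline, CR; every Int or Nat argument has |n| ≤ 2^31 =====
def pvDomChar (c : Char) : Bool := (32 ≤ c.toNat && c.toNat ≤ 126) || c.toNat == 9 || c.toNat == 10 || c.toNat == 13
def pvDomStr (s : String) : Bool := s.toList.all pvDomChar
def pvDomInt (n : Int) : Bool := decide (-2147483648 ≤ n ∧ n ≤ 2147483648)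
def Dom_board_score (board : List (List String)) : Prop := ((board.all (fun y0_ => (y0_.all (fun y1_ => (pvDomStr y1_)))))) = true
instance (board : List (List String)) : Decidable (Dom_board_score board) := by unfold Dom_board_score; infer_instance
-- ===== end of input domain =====

-- B tallies each distinct square string once (a counting dict built in one pass) and sums
-- sign*value*count over the distinct entries, instead of A's per-square branch cascade.

-- ===== PORT A =====
-- per-square body of A's inner loop; s[0]/s[1] via pyGet? (none = IndexError, excluded by Pre_,
-- there the accumulator is returned unchanged)
def pvStepA (score : Int) (s : String) : Int :=
  match PySem.Str.pyGet? s 0 with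
  | none => score                   -- IndexError on s[0]; outside Pre_
  | some c0 =>
    if c0 = 'w' then
      match PySem.Str.pyGet? s 1 with
      | none => score               -- IndexError on s[1]; outside Pre_
      | some c1 =>
        if c1 = 'p' then score + 1 * 1
        else if c1 = 'N' ∨ c1 = 'B' then score + 1 * 3
        else if c1 = 'r' then score + 1 * 5
        else if c1 = 'Q' then score + 1 * 10
        else if c1 = 'K' then score + 0
        else score
    else if c0 = 'b' then
      match PySem.Str.pyGet? s 1 with
      | none => score               -- IndexError on s[1]; outside Pre_
      | some c1 =>
        if c1 = 'p' then score + (-1) * 1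
        else if c1 = 'N' ∨ c1 = 'B' then score + (-1) * 3
        else if c1 = 'r' then score + (-1) * 5
        else if c1 = 'Q' then score + (-1) * 10
        else if c1 = 'K' then score + 0
        else score
    else score                      -- continue

def board_score (board : List (List String)) : Int :=
  board.foldl (fun score r => r.foldl pvStepA score) 0

-- ===== PORT B =====
def pvSigns : PySem.Dict String Int := PySem.Dict.ofList [("w", 1), ("b", -1)]
def pvValues : PySem.Dict String Int :=
  PySem.Dict.ofList [("p", 1), ("N", 3), ("B", 3), ("r", 5), ("Q", 10), ("K", 0)]

-- weight of one distinct piece string: signs.get(p[:1], 0) * values.get(p[1:2], 0)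
def pvWeight (p : String) : Int :=
  pvSigns.getD (PySem.Str.slice p none (some 1)) 0 *
    pvValues.getD (PySem.Str.slice p (some 1) (some 2)) 0

def board_score_alt (board : List (List String)) : Int :=
  ((board.foldl (fun d r => r.foldl (fun d s => d.insert s (d.getD s 0 + 1)) d)
      PySem.Dict.empty).items.map (fun pn => pvWeight pn.1 * pn.2)).sum

-- ===== PRECONDITION & SPEC =====
-- Pre_ excludes exactly the squares on which A raises IndexError: an empty square string (s[0])
-- and a one-character square string starting with 'w' or 'b' (s[1]).
def pvOkSquare (s : String) : Bool :=
  match s.toList with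
  | [] => false
  | [c] => !(c = 'w' || c = 'b')
  | _ :: _ :: _ => true

def Pre_board_score (board : List (List String)) : Prop :=
  (board.all (fun r => r.all pvOkSquare)) = true
instance (board : List (List String)) : Decidable (Pre_board_score board) := by
  unfold Pre_board_score; infer_instance

def pvWitness_board_score : List (List String) :=
  [["wp", "--", "bQ"], ["bN", "wK", "x"]]

-- On boards containing an empty square string or a one-character 'w…'/'b…' square, A raises
-- IndexError; B returns the material sum with those squares contributing 0.
def Raises_board_score (board : List (List String)) : Prop :=
  (board.all (fun r => r.all pvOkSquare)) = false
instance (board : List (List String)) : Decidable (Raises_board_score board) := by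
  unfold Raises_board_score; infer_instance
def pvRaiseWitness_board_score : List (List String) := [["wp", "w", ""]]
def pvRaiseWitnessOut_board_score : Int := 1

def Spec_board_score (board : List (List String)) (out : Int) : Prop := out = board_score_alt board
instance (board : List (List String)) (out : Int) : Decidable (Spec_board_score board out) := by
  unfold Spec_board_score; infer_instance

-- ===== CLAIM (what is proved, stated in full; the proofs are below) =====
def Claim_equal_board_score : Prop := ∀ (board : List (List String)), Dom_board_score board → Pre_board_score board → Spec_board_score board (board_score board)
def Claim_raises_board_score : Prop := (∀ (board : List (List String)), Dom_board_score board → Raises_board_score board → ¬ Pre_board_score board) ∧ (Dom_board_score (pvRaiseWitness_board_score) ∧ Raises_board_score (pvRaiseWitness_board_score) ∧ board_score_alt (pvRaiseWitness_board_score) = pvRaiseWitnessOut_board_score)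

-- ===== LEMMAS AND PROOFS =====

-- the per-square contributions of both sides, factored through the first two characters

def signChar (c : Char) : Int := if c = 'w' then 1 else if c = 'b' then -1 else 0
def valChar (d : Char) : Int :=
  if d = 'p' then 1 else if d = 'N' ∨ d = 'B' then 3 else if d = 'r' then 5
  else if d = 'Q' then 10 else 0

lemma pvOfListNe (a c : Char) (h : ¬ c = a) : String.ofList [a] ≠ String.ofList [c] := by
  intro hh; apply h
  have h2 := congrArg String.toList hh
  simp at h2; exact h2.symm

lemma pvSigns_getD (c : Char) : pvSigns.getD (String.ofList [c]) 0 = signChar c := by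
  by_cases h1 : c = 'w'
  · subst h1; decide
  · by_cases h2 : c = 'b'
    · subst h2; decide
    · have hn : pvSigns.get? (String.ofList [c]) = none := by
        rw [PySem.Dict.get?_eq_none_iff_not_mem_keys]
        have hk : pvSigns.keys = ["w", "b"] := by decide
        rw [hk]; simp
        exact ⟨Ne.symm (pvOfListNe 'w' c h1), Ne.symm (pvOfListNe 'b' c h2)⟩
      simp [PySem.Dict.getD_eq_get?_getD, hn, signChar, h1, h2]

lemma pvValues_getD (d : Char) : pvValues.getD (String.ofList [d]) 0 = valChar d := by
  by_cases h1 : d = 'p'; · subst h1; decide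
  by_cases h2 : d = 'N'; · subst h2; decide
  by_cases h3 : d = 'B'; · subst h3; decide
  by_cases h4 : d = 'r'; · subst h4; decide
  by_cases h5 : d = 'Q'; · subst h5; decide
  by_cases h6 : d = 'K'; · subst h6; decide
  have hn : pvValues.get? (String.ofList [d]) = none := by
    rw [PySem.Dict.get?_eq_none_iff_not_mem_keys]
    have hk : pvValues.keys = ["p", "N", "B", "r", "Q", "K"] := by decide
    rw [hk]; simp
    exact ⟨Ne.symm (pvOfListNe 'p' d h1), Ne.symm (pvOfListNe 'N' d h2),
      Ne.symm (pvOfListNe 'B' d h3), Ne.symm (pvOfListNe 'r' d h4),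
      Ne.symm (pvOfListNe 'Q' d h5), Ne.symm (pvOfListNe 'K' d h6)⟩
  simp [PySem.Dict.getD_eq_get?_getD, hn, valChar, h1, h2, h3, h4, h5]

lemma pvSlice01 (s : String) (c : Char) (rest : List Char) (h : s.toList = c :: rest) :
    PySem.Str.slice s none (some 1) = String.ofList [c] := by
  simp [PySem.Str.slice, PySem.List.slice, h]

lemma pvSlice12 (s : String) (c d : Char) (rest : List Char) (h : s.toList = c :: d :: rest) :
    PySem.Str.slice s (some 1) (some 2) = String.ofList [d] := by
  simp [PySem.Str.slice, PySem.List.slice, h]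

lemma pvSlice12_short (s : String) (c : Char) (h : s.toList = [c]) :
    PySem.Str.slice s (some 1) (some 2) = String.ofList [] := by
  simp [PySem.Str.slice, PySem.List.slice, h]

lemma pvGet0 (s : String) (c : Char) (rest : List Char) (h : s.toList = c :: rest) :
    PySem.Str.pyGet? s 0 = some c := by
  simp [PySem.Str.pyGet?, h, PySem.List.pyGet?, PySem.List.pyIdx?]

lemma pvGet1 (s : String) (c d : Char) (rest : List Char) (h : s.toList = c :: d :: rest) :
    PySem.Str.pyGet? s 1 = some d := by
  simp [PySem.Str.pyGet?, h, PySem.List.pyGet?, PySem.List.pyIdx?]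

-- per-square contribution of A, as a standalone value
def pvContribA (s : String) : Int := pvStepA 0 s

lemma pvStepA_eq_add (score : Int) (s : String) : pvStepA score s = score + pvContribA s := by
  unfold pvContribA pvStepA
  rcases h0 : PySem.Str.pyGet? s 0 with _ | c0 <;> simp only []
  · ring
  · split_ifs with hw hb
    all_goals (try (rcases h1 : PySem.Str.pyGet? s 1 with _ | c1 <;> simp only []))
    all_goals (try split_ifs)
    all_goals ring

lemma pvContribA_chars (s : String) (c d : Char) (rest : List Char)
    (h : s.toList = c :: d :: rest) : pvContribA s = signChar c * valChar d := by
  unfold pvContribA pvStepA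
  rw [pvGet0 s c (d :: rest) h, pvGet1 s c d rest h]
  simp only [signChar, valChar]
  split_ifs <;> norm_num

lemma pvWeight_chars (s : String) (c d : Char) (rest : List Char)
    (h : s.toList = c :: d :: rest) : pvWeight s = signChar c * valChar d := by
  unfold pvWeight
  rw [pvSlice01 s c (d :: rest) h, pvSlice12 s c d rest h, pvSigns_getD, pvValues_getD]

lemma pvContribA_eq_weight (s : String) (hok : pvOkSquare s = true) :
    pvContribA s = pvWeight s := by
  rcases h : s.toList with _ | ⟨c, _ | ⟨d, rest⟩⟩
  · unfold pvOkSquare at hok; rw [h] at hok; simp at hok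
  · unfold pvOkSquare at hok; rw [h] at hok; simp at hok
    obtain ⟨hw, hb⟩ := hok
    have hA : pvContribA s = 0 := by
      unfold pvContribA pvStepA
      rw [pvGet0 s c [] h]
      simp [hw, hb]
    have hB : pvWeight s = 0 := by
      unfold pvWeight
      rw [pvSlice01 s c [] h, pvSlice12_short s c h, pvSigns_getD]
      simp [signChar, hw, hb]
    rw [hA, hB]
  · rw [pvContribA_chars s c d rest h, pvWeight_chars s c d rest h]

-- flattening the two nested loops

lemma pvFoldl_step_eq (board : List (List String)) (init : Int) :
    board.foldl (fun score r => r.foldl pvStepA score) init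
      = board.flatten.foldl pvStepA init := by
  induction board generalizing init with
  | nil => rfl
  | cons r rs ih => simp [List.foldl_append, ih]

lemma pvFoldl_counts_eq (board : List (List String)) (d : PySem.Dict String Int) :
    board.foldl (fun d r => r.foldl (fun d s => d.insert s (d.getD s 0 + 1)) d) d
      = board.flatten.foldl (fun d s => d.insert s (d.getD s 0 + 1)) d := by
  induction board generalizing d with
  | nil => rfl
  | cons r rs ih => simp [List.foldl_append, ih]

-- a per-element sum equals the count-weighted sum over any nodup cover of the elements

lemma pvSum_delta (c : String → Int) (S : List String) (hnd : S.Nodup) (x : String)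
    (hx : x ∈ S) : (S.map (fun k => if x = k then c k else 0)).sum = c x := by
  induction S with
  | nil => cases hx
  | cons a t ih =>
    rcases List.mem_cons.mp hx with rfl | hxt
    · have hnot : x ∉ t := (List.nodup_cons.mp hnd).1
      have hz : (t.map (fun k => if x = k then c k else 0)).sum = 0 := by
        apply List.sum_eq_zero
        intro y hy
        rcases List.mem_map.mp hy with ⟨k, hk, rfl⟩
        have : ¬ x = k := by rintro rfl; exact hnot hk
        simp [this]
      simp [hz]
    · have hne : ¬ x = a := by
        rintro rfl; exact (List.nodup_cons.mp hnd).1 hxt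
      have := ih (List.nodup_cons.mp hnd).2 hxt
      simp [List.map_cons, List.sum_cons, hne, this]

lemma pvSum_counted (xs S : List String) (c : String → Int)
    (hnd : S.Nodup) (hcov : ∀ s ∈ xs, s ∈ S) :
    (xs.map c).sum = (S.map (fun k => c k * (xs.count k : Int))).sum := by
  induction xs with
  | nil => simp
  | cons x t ih =>
    have hx : x ∈ S := hcov x (List.mem_cons_self ..)
    have hcov' : ∀ s ∈ t, s ∈ S := fun s hs => hcov s (List.mem_cons_of_mem _ hs)
    have hpt : ∀ k ∈ S, c k * (((x :: t).count k : Nat) : Int)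
        = c k * ((t.count k : Nat) : Int) + (if x = k then c k else 0) := by
      intro k _
      rw [List.count_cons]
      by_cases hxk : x = k
      · subst hxk; push_cast; simp; ring
      · have : ¬ (k == x) = true := by
          simp [beq_iff_eq]; exact fun hh => hxk hh.symm
        simp [hxk]
    calc ((x :: t).map c).sum = c x + (t.map c).sum := by simp
      _ = c x + (S.map (fun k => c k * (t.count k : Int))).sum := by rw [ih hcov']
      _ = (S.map (fun k => c k * (t.count k : Int))).sum
            + (S.map (fun k => if x = k then c k else 0)).sum := by
            rw [pvSum_delta c S hnd x hx]; ring
      _ = (S.map (fun k => c k * ((x :: t).count k : Int))).sum := by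
            rw [List.map_congr_left hpt]
            rw [PySem.List.sum_map_add_int]

theorem board_score_spec : Claim_equal_board_score := by
  intro board _ hpre
  unfold Spec_board_score board_score board_score_alt
  rw [pvFoldl_step_eq, pvFoldl_counts_eq,
    PySem.Dict.foldl_insert_getD_add_one_eq_counter, PySem.Dict.items_counter, List.map_map]
  have hA : board.flatten.foldl pvStepA 0 = 0 + (board.flatten.map pvContribA).sum := by
    have h1 : List.foldl pvStepA 0 board.flatten
        = List.foldl (fun acc s => acc + pvContribA s) 0 board.flatten := by
      apply PySem.List.foldl_congr_mem
      intro acc x _; exact pvStepA_eq_add acc x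
    rw [h1, PySem.List.foldl_add]
  rw [hA]
  have hok : ∀ s ∈ board.flatten, pvOkSquare s = true := by
    intro s hs
    rcases List.mem_flatten.mp hs with ⟨r, hr, hsr⟩
    unfold Pre_board_score at hpre
    simp [List.all_eq_true] at hpre
    exact hpre r hr s hsr
  have hcw : board.flatten.map pvContribA = board.flatten.map pvWeight := by
    apply List.map_congr_left; intro s hs; exact pvContribA_eq_weight s (hok s hs)
  rw [hcw, pvSum_counted board.flatten (PySem.Set.ofList board.flatten) pvWeight
    (PySem.Set.nodup_ofList board.flatten)
    (fun s hs => (PySem.Set.mem_ofList _ _).mpr hs)]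
  simp [Function.comp_def]

theorem board_score_raises : Claim_raises_board_score := by
  unfold Claim_raises_board_score
  refine ⟨?_, by decide, by decide, by decide⟩
  intro board _ hr hp
  unfold Raises_board_score at hr
  unfold Pre_board_score at hp
  rw [hp] at hr; cases hr

-- self-check that the raise witness is as stated (keeps the verdict above in use by name)
theorem pv_raise_witness_ok : Dom_board_score pvRaiseWitness_board_score ∧
    Raises_board_score pvRaiseWitness_board_score ∧
    board_score_alt pvRaiseWitness_board_score = pvRaiseWitnessOut_board_score :=
  board_score_raises.2
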